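-- pv_equiv track=rewrite | github.com/tsinghua-fib-lab/moss-benchmark | OptPref/convertor/to_cityflow.py | remove_loop
-- ===== SOURCE A (Python) =====
-- def remove_loop(route):
--     next = {}
--     for i, j in zip(route, route[1:]):
--         next[i] = j
--     next[route[-1]] = None
--     r = route[:1]
--     while True:
--         n = next[r[-1]]
--         if n is None:
--             break
--         r.append(n)
--     return r
-- ===== SOURCE B (Python) =====
-- def remove_loop(route):
--     r = []
--     for x in route:
--         if x in r:
--             del r[r.index(x)+1:]
--         else:
--             r.append(x)
--     return r
-- ===== Notes on version B (the rewrite author's own statement) =====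
-- stated objective: simpler
-- what changed: Replaces A's two-phase algorithm (build a successor dict from consecutive pairs, then re-walk it from route[0] until the None sentinel) by a single forward pass that appends each unseen node and truncates the result back to a node's earlier position when it is revisited.
import Mathlib
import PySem

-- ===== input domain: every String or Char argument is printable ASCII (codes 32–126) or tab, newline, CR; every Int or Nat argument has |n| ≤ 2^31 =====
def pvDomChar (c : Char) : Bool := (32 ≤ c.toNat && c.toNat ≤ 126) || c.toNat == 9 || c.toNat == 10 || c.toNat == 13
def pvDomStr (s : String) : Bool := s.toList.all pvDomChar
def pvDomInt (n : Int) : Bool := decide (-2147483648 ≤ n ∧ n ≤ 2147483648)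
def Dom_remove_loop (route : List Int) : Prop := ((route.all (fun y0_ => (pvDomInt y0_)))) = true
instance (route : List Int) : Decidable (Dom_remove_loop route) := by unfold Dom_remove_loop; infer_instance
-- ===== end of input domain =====

-- B replaces A's successor-dict-then-walk by a single forward pass that truncates the
-- partial result at each revisited node (objective: simpler).

-- ===== PORT A =====
-- next = {}; for i, j in zip(route, route[1:]): next[i] = j
def pairsD (route : List Int) : PySem.Dict Int (Option Int) :=
  (route.zip route.tail).foldl (fun d p => d.insert p.1 (some p.2)) PySem.Dict.empty

-- the while-True loop; r is nonempty throughout (starts as route[:1]), so r[-1] is r.getLast?.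
-- fuel (route.length + 1) is a totality guard only; the proof shows it is never exhausted on Pre_.
def walkA (next : PySem.Dict Int (Option Int)) : Nat → List Int → List Int
  | 0, r => r
  | fuel + 1, r =>
    match r.getLast? with
    | none => r                                   -- unreachable: r nonempty
    | some lastv =>
      match next.get? lastv with
      | some (some n) => walkA next fuel (r ++ [n])
      | some none => r                            -- n is None: break
      | none => r                                 -- KeyError: unreachable

def remove_loop (route : List Int) : List Int :=
  match route.getLast? with
  | none => []                                    -- route[-1] raises IndexError: excluded by Pre_
  | some lastv =>
    let next := (pairsD route).insert lastv none  -- next[route[-1]] = None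
    walkA next (route.length + 1) (route.take 1)  -- r = route[:1]; while True: ...

-- ===== PORT B =====
def bStep (r : List Int) (x : Int) : List Int :=
  if x ∈ r then
    match PySem.List.index? r x with
    | some i => r.take (i + 1)                    -- del r[r.index(x)+1:]
    | none => r                                   -- unreachable given x ∈ r
  else r ++ [x]

def remove_loop_alt (route : List Int) : List Int := route.foldl bStep []

-- ===== PRECONDITION & SPEC =====
-- A evaluates route[-1], which raises IndexError on the empty list.
def Pre_remove_loop (route : List Int) : Prop := route ≠ []
instance (route : List Int) : Decidable (Pre_remove_loop route) := by
  unfold Pre_remove_loop; infer_instance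
def pvWitness_remove_loop : List Int := [1, 2, 1, 3]

def Spec_remove_loop (route : List Int) (out : List Int) : Prop := out = remove_loop_alt route
instance (route : List Int) (out : List Int) : Decidable (Spec_remove_loop route out) := by
  unfold Spec_remove_loop; infer_instance

-- ===== CLAIM (what is proved, stated in full; the proofs are below) =====
def Claim_equal_remove_loop : Prop := ∀ (route : List Int), Dom_remove_loop route → Pre_remove_loop route → Spec_remove_loop route (remove_loop route)

-- ===== LEMMAS AND PROOFS =====

-- the successor relation read off A's dict
def Rnext (D : PySem.Dict Int (Option Int)) (u v : Int) : Prop := D.get? u = some (some v)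

-- zip of a snoc with its tail splits off the final pair
lemma zip_tail_snoc : ∀ (as : List Int) (a y : Int),
    (a :: (as ++ [y])).zip (as ++ [y]) =
      (a :: as).zip as ++ [((a :: as).getLast (by simp), y)] := by
  intro as
  induction as with
  | nil => intro a y; simp
  | cons b bs ih =>
      intro a y
      simpa [List.zip] using congrArg (fun l => (a, b) :: l) (ih b y)

lemma pairsD_snoc (as : List Int) (a y : Int) :
    pairsD ((a :: as) ++ [y]) =
      (pairsD (a :: as)).insert ((a :: as).getLast (by simp)) (some y) := by
  unfold pairsD
  simp only [List.cons_append, List.tail_cons]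
  rw [zip_tail_snoc]
  simp [List.foldl_append]

-- get? characterization of the full next-dict of route ++ [y], away from y and route's last
lemma nextD_snoc_get (as : List Int) (a y x : Int) (hxy : x ≠ y)
    (hxl : x ≠ (a :: as).getLast (by simp)) :
    ((pairsD ((a :: as) ++ [y])).insert y none).get? x =
      ((pairsD (a :: as)).insert ((a :: as).getLast (by simp)) none).get? x := by
  rw [pairsD_snoc, PySem.Dict.get?_insert_of_ne _ _ hxy,
    PySem.Dict.get?_insert_of_ne _ _ hxl, PySem.Dict.get?_insert_of_ne _ _ hxl]

lemma nextD_snoc_get_last (as : List Int) (a y : Int)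
    (hly : (a :: as).getLast (by simp) ≠ y) :
    ((pairsD ((a :: as) ++ [y])).insert y none).get? ((a :: as).getLast (by simp)) =
      some (some y) := by
  rw [pairsD_snoc, PySem.Dict.get?_insert_of_ne _ _ hly, PySem.Dict.get?_insert_self]

-- B's fold step on a snoc
lemma alt_snoc (route : List Int) (y : Int) :
    remove_loop_alt (route ++ [y]) = bStep (remove_loop_alt route) y := by
  simp [remove_loop_alt, List.foldl_append]

-- the walk follows any chain whose last entry maps to None
lemma walk_chain (D : PySem.Dict Int (Option Int)) :
    ∀ (s : List Int) (u : Int) (t : List Int) (fuel : Nat),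
      List.IsChain (Rnext D) (u :: s) →
      D.get? ((u :: s).getLast (by simp)) = some none →
      s.length ≤ fuel →
      walkA D fuel (t ++ [u]) = t ++ u :: s := by
  intro s
  induction s with
  | nil =>
      intro u t fuel _ hlast _
      have hu : D.get? u = some none := hlast
      cases fuel with
      | zero => simp [walkA]
      | succ f => simp [walkA, List.getLast?_concat, hu]
  | cons v s' ih =>
      intro u t fuel hch hlast hf
      cases fuel with
      | zero => simp at hf
      | succ f =>
          have hR : D.get? u = some (some v) := (List.isChain_cons_cons.mp hch).1
          have hch' : List.IsChain (Rnext D) (v :: s') := (List.isChain_cons_cons.mp hch).2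
          have hlast' : D.get? ((v :: s').getLast (by simp)) = some none := by
            simpa [List.getLast_cons] using hlast
          have hstep : walkA D (f + 1) (t ++ [u]) = walkA D f ((t ++ [u]) ++ [v]) := by
            simp [walkA, List.getLast?_concat, hR]
          rw [hstep, ih v (t ++ [u]) f hch' hlast' (by simpa using Nat.le_of_succ_le_succ hf)]
          simp

-- the chain invariant of B's result, by snoc induction on route
lemma alt_chain : ∀ (route : List Int), route ≠ [] →
    remove_loop_alt route ≠ [] ∧
    (remove_loop_alt route).head? = route.head? ∧
    (remove_loop_alt route).getLast? = route.getLast? ∧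
    (remove_loop_alt route).Nodup ∧
    (remove_loop_alt route).length ≤ route.length ∧
    (∀ lastv, route.getLast? = some lastv →
      List.IsChain (Rnext ((pairsD route).insert lastv none)) (remove_loop_alt route)) := by
  intro route
  induction route using List.reverseRecOn with
  | nil => intro h; exact absurd rfl h
  | append_singleton r y ih =>
      intro _
      rcases r with _ | ⟨a, as⟩
      · -- route = [y]
        have hc : remove_loop_alt ([] ++ [y]) = [y] := by simp [remove_loop_alt, bStep]
        rw [hc]
        refine ⟨by simp, by simp, by simp, by simp, by simp, ?_⟩
        intro lastv _; simp
      · -- route = (a :: as) ++ [y]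
        obtain ⟨hne, hhd, hlst, hnd, hln, hch⟩ := ih (by simp)
        set cl := remove_loop_alt (a :: as) with hcdef
        have hposc : 0 < cl.length := List.length_pos_of_ne_nil hne
        have hlstR : cl.getLast? = some ((a :: as).getLast (by simp)) := by
          rw [hlst]; exact List.getLast?_eq_some_getLast _
        have hchain := hch ((a :: as).getLast (by simp)) (List.getLast?_eq_some_getLast _)
        have hgetLastElem : cl[cl.length - 1]'(by omega) = (a :: as).getLast (by simp) := by
          have h1 : cl[cl.length - 1]? = some ((a :: as).getLast (by simp)) := by
            rw [← List.getLast?_eq_getElem?]; exact hlstR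
          exact (List.getElem?_eq_some_iff.mp h1).choose_spec
        rw [alt_snoc, ← hcdef]
        by_cases hyc : y ∈ cl
        · -- revisit: truncate
          obtain ⟨i, hi⟩ := Option.isSome_iff_exists.mp
            ((PySem.List.index?_isSome_iff (xs := cl) (v := y)).mpr hyc)
          obtain ⟨hk, hcy, hfirst⟩ := PySem.List.getElem_of_index?_eq_some hi
          have hb : bStep cl y = cl.take (i + 1) := by
            unfold bStep; rw [if_pos hyc, hi]
          rw [hb]
          have hlen' : (cl.take (i + 1)).length = i + 1 := by simp; omega
          have hgl : (cl.take (i + 1)).getLast? = some y := by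
            rw [List.getLast?_eq_getElem?, hlen']
            simpa [List.getElem?_take_of_succ] using (List.getElem?_eq_some_iff.mpr ⟨hk, hcy⟩)
          refine ⟨?_, ?_, ?_, ?_, ?_, ?_⟩
          · intro h; rw [h] at hlen'; simp at hlen'
          · rw [List.head?_take]; simp [hhd]
          · rw [hgl]; exact List.getLast?_concat.symm
          · exact hnd.sublist (List.take_sublist _ _)
          · simp only [List.length_append, List.length_cons] at *; omega
          · intro lastv hlv
            have hly' : y = lastv := by
              have h2 : ((a :: as) ++ [y]).getLast? = some lastv := hlv
              rw [List.getLast?_concat] at h2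
              exact Option.some.inj h2
            subst hly'
            rw [List.isChain_iff_getElem]
            intro j hj
            rw [hlen'] at hj
            have hji : j < i := by omega
            have hjc : j + 1 < cl.length := by omega
            have e1 : (cl.take (i + 1))[j]'(by rw [hlen']; omega) = cl[j]'(by omega) :=
              List.getElem_take
            have e2 : (cl.take (i + 1))[j + 1]'(by rw [hlen']; omega) = cl[j + 1]'hjc :=
              List.getElem_take
            rw [e1, e2]
            have hR := (List.isChain_iff_getElem.mp hchain) j hjc
            have h1 : cl[j]'(by omega) ≠ y := hfirst j hji
            have h2 : cl[j]'(by omega) ≠ (a :: as).getLast (by simp) := by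
              intro he
              rw [← hgetLastElem] at he
              have := (List.Nodup.getElem_inj_iff hnd).mp he
              omega
            show Rnext _ _ _
            unfold Rnext at hR ⊢
            rw [nextD_snoc_get as a y _ h1 h2]
            exact hR
        · -- new node: append
          have hb : bStep cl y = cl ++ [y] := by simp [bStep, hyc]
          rw [hb]
          have hlastMem : (a :: as).getLast (by simp) ∈ cl := by
            rw [← hgetLastElem]; exact List.getElem_mem _
          have hly : (a :: as).getLast (by simp) ≠ y := fun he => hyc (he ▸ hlastMem)
          refine ⟨by simp, ?_, by rw [List.getLast?_concat]; exact List.getLast?_concat.symm, ?_, ?_, ?_⟩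
          · simp [List.head?_append, hhd]
          · simp only [List.nodup_append, List.nodup_cons, List.nodup_nil, and_true, true_and]
            refine ⟨hnd, by simp, ?_⟩
            intro b hbm bb hbb
            simp only [List.mem_singleton] at hbb
            subst hbb
            exact fun hbe => hyc (hbe ▸ hbm)
          · simp only [List.length_append, List.length_cons] at *; omega
          · intro lastv hlv
            have hly' : y = lastv := by
              have h2 : ((a :: as) ++ [y]).getLast? = some lastv := hlv
              rw [List.getLast?_concat] at h2
              exact Option.some.inj h2
            subst hly'
            rw [List.isChain_iff_getElem]
            intro j hj
            simp only [List.length_append, List.length_cons, List.length_nil] at hj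
            by_cases hjl : j + 1 < cl.length
            · have e1 : (cl ++ [y])[j]'(by simp; omega) = cl[j]'(by omega) :=
                List.getElem_append_left (by omega)
              have e2 : (cl ++ [y])[j + 1]'(by simp; omega) = cl[j + 1]'hjl :=
                List.getElem_append_left hjl
              rw [e1, e2]
              have hR := (List.isChain_iff_getElem.mp hchain) j hjl
              have h1 : cl[j]'(by omega) ≠ y := fun he => hyc (he ▸ List.getElem_mem _)
              have h2 : cl[j]'(by omega) ≠ (a :: as).getLast (by simp) := by
                intro he
                rw [← hgetLastElem] at he
                have := (List.Nodup.getElem_inj_iff hnd).mp he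
                omega
              show Rnext _ _ _
              unfold Rnext at hR ⊢
              rw [nextD_snoc_get as a y _ h1 h2]
              exact hR
            · have hjeq : j = cl.length - 1 := by omega
              have e1 : (cl ++ [y])[j]'(by simp; omega) = cl[j]'(by omega) :=
                List.getElem_append_left (by omega)
              have e2 : (cl ++ [y])[j + 1]'(by simp; omega) = y :=
                List.getElem_concat_length (show j + 1 = cl.length by omega) _
              rw [e1, e2]
              show Rnext _ _ _
              unfold Rnext
              have hjq : cl[j]'(by omega) = cl[cl.length - 1]'(by omega) := by
                congr 1
                all_goals omega
              rw [hjq, hgetLastElem]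
              exact nextD_snoc_get_last as a y hly

-- ===== VERDICT (by name: the statement is the Claim_ definition above) =====
theorem remove_loop_spec : Claim_equal_remove_loop := by
  intro route _ hpre
  unfold Spec_remove_loop
  obtain ⟨hne, hhead, hlastq, hnodup, hlen, hchain⟩ := alt_chain route hpre
  obtain ⟨h, rest, rfl⟩ := List.exists_cons_of_ne_nil hpre
  obtain ⟨lastv, hl⟩ : ∃ l, (h :: rest).getLast? = some l :=
    ⟨_, List.getLast?_eq_some_getLast (by simp)⟩
  obtain ⟨u, cs, hc⟩ := List.exists_cons_of_ne_nil hne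
  have hu : h = u := by
    have := hhead; rw [hc] at this; simpa using this.symm
  subst hu
  unfold remove_loop
  rw [hl]
  have hch := hchain lastv hl
  rw [hc] at hch
  have hgl : ((h :: cs).getLast (by simp)) = lastv := by
    have h2 : (h :: cs).getLast? = some lastv := by rw [← hc, hlastq, hl]
    rw [List.getLast?_eq_some_getLast (l := h :: cs) (by simp)] at h2
    exact Option.some.inj h2
  have hlastD : ((pairsD (h :: rest)).insert lastv none).get? ((h :: cs).getLast (by simp)) =
      some none := by
    rw [hgl]; exact PySem.Dict.get?_insert_self _ _ _
  have hflen : cs.length ≤ (h :: rest).length + 1 := by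
    have := hlen; rw [hc] at this
    simp only [List.length_cons] at this ⊢; omega
  have hwalk := walk_chain ((pairsD (h :: rest)).insert lastv none) cs h []
    ((h :: rest).length + 1) hch hlastD hflen
  simpa [hc] using hwalk
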